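-- pv_equiv track=rewrite | github.com/farshov/SiriusIntentPrediction | quality_metrics/stat_tests.py | rank_sum
-- ===== SOURCE A (Python) =====
-- def rank_sum(our_acc, theirs_acc):
--     our_acc = list(zip(our_acc, ["o"] * len(our_acc)))
--     theirs_acc = list(zip(theirs_acc, ["t"] * len(theirs_acc)))
--     together = our_acc + theirs_acc
--     together = sorted(together)
--     together = list(enumerate(together))
--     sum_rank_our = 0
--     sum_rank_theirs = 0
--     for el in together:
--         if el[1][1] == "o":
--             sum_rank_our += el[0] + 1
--         else:
--             sum_rank_theirs += el[0] + 1
--     return sum_rank_our, sum_rank_theirs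
-- ===== SOURCE B (Python) =====
-- def rank_sum(our_acc, theirs_acc):
--     ours = sorted(our_acc)
--     theirs = sorted(theirs_acc)
--     i = 0
--     j = 0
--     rank = 1
--     sum_rank_our = 0
--     sum_rank_theirs = 0
--     while i < len(ours) or j < len(theirs):
--         if i < len(ours) and (j >= len(theirs) or ours[i] <= theirs[j]):
--             sum_rank_our += rank
--             i += 1
--         else:
--             sum_rank_theirs += rank
--             j += 1
--         rank += 1
--     return sum_rank_our, sum_rank_theirs
-- ===== Notes on version B (the rewrite author's own statement) =====
-- stated objective: alternative
-- what changed: Instead of tagging every value with a string, sorting the combined tuple list and enumerating it, B sorts the two lists separately and merges them with two pointers and a running 1-based rank counter (ties go to our_acc, matching the ('v','o')<('v','t') tuple order), accumulating both rank sums in one walk with no tagging, concatenation or enumeration.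
import Mathlib
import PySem

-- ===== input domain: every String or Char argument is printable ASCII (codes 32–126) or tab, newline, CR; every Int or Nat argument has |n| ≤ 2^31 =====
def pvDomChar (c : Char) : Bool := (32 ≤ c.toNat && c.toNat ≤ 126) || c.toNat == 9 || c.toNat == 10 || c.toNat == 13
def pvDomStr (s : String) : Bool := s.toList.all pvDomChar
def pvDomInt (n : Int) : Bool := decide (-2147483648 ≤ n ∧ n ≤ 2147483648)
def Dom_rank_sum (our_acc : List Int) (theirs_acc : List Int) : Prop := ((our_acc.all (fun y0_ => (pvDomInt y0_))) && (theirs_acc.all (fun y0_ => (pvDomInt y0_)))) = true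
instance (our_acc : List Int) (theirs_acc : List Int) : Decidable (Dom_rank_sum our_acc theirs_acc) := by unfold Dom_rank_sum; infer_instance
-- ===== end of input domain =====

-- B replaces A's tag-sort-enumerate over combined (value, "o"/"t") tuples by a two-pointer
-- merge of the two separately sorted lists with a running 1-based rank counter (alternative
-- decomposition, same asymptotic cost).


-- ===== PORT A =====
-- our_acc = list(zip(our_acc, ["o"]*len(our_acc))); theirs likewise; together sorted as tuples
-- (Python's tuple sort = sorted2 with fst/snd keys); enumerate; fold accumulating both sums.
def rank_sum (our_acc : List Int) (theirs_acc : List Int) : Int × Int :=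
  let ourz := List.zip our_acc (PySem.List.pyRepeat ["o"] (our_acc.length : Int))
  let theirsz := List.zip theirs_acc (PySem.List.pyRepeat ["t"] (theirs_acc.length : Int))
  let together := ourz ++ theirsz
  let sortedTogether := PySem.List.sorted2 together Prod.fst Prod.snd
  let enumerated := PySem.List.enumerate sortedTogether
  let sums := enumerated.foldl
    (fun acc el =>
      if el.2.2 == "o" then (acc.1 + el.1 + 1, acc.2) else (acc.1, acc.2 + el.1 + 1))
    ((0 : Int), (0 : Int))
  sums

-- ===== PORT B =====
-- the while-loop of Source B: two indices become the two list tails; rank is the 1-based counter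
def rank_sum_alt_loop : List Int → List Int → Int → Int → Int → Int × Int
  | [], [], _, so, st => (so, st)
  | [], b :: bt, rank, so, st => rank_sum_alt_loop [] bt (rank + 1) so (st + rank)
  | a :: at_, [], rank, so, st => rank_sum_alt_loop at_ [] (rank + 1) (so + rank) st
  | a :: at_, b :: bt, rank, so, st =>
      if a ≤ b then rank_sum_alt_loop at_ (b :: bt) (rank + 1) (so + rank) st
      else rank_sum_alt_loop (a :: at_) bt (rank + 1) so (st + rank)

def rank_sum_alt (our_acc : List Int) (theirs_acc : List Int) : Int × Int :=
  rank_sum_alt_loop (PySem.List.sorted our_acc (fun x => x) false)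
    (PySem.List.sorted theirs_acc (fun x => x) false) 1 0 0

-- ===== PRECONDITION & SPEC =====
def Spec_rank_sum (our_acc : List Int) (theirs_acc : List Int) (out : Int × Int) : Prop := out = rank_sum_alt our_acc theirs_acc
instance (our_acc : List Int) (theirs_acc : List Int) (out : Int × Int) : Decidable (Spec_rank_sum our_acc theirs_acc out) := by unfold Spec_rank_sum; infer_instance

-- ===== CLAIM (what is proved, stated in full; the proofs are below) =====
def Claim_equal_rank_sum : Prop := ∀ (our_acc : List Int) (theirs_acc : List Int), Dom_rank_sum our_acc theirs_acc → Spec_rank_sum our_acc theirs_acc (rank_sum our_acc theirs_acc)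

-- ===== LEMMAS AND PROOFS =====

-- the comparison sorted2 uses on (value, tag) pairs
def pvBefore (a b : Int × String) : Bool :=
  decide (a.1 < b.1) || (!decide (b.1 < a.1) && decide (a.2 < b.2))

-- the tagged merge of the two sorted lists (proof-side model of B's walk)
def pvMergeT : List Int → List Int → List (Int × String)
  | [], bs => bs.map (fun b => (b, "t"))
  | a :: at_, [] => (a, "o") :: pvMergeT at_ []
  | a :: at_, b :: bt =>
      if a ≤ b then (a, "o") :: pvMergeT at_ (b :: bt)
      else (b, "t") :: pvMergeT (a :: at_) bt

-- rank-sum walk over a tagged list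
def pvSumRanks : List (Int × String) → Int → Int → Int → Int × Int
  | [], _, so, st => (so, st)
  | (v, t) :: rest, rank, so, st =>
      if t == "o" then pvSumRanks rest (rank + 1) (so + rank) st
      else pvSumRanks rest (rank + 1) so (st + rank)


theorem pvStr_ot : ("o" : String) < "t" := by simp [String.lt_iff_toList_lt]; decide

theorem pvStr_not_to : ¬ ("t" : String) < "o" := by simp [String.lt_iff_toList_lt]; decide

theorem pvBefore_trans (a b c : Int × String) (h1 : pvBefore a b = true)
    (h2 : pvBefore b c = true) : pvBefore a c = true := by
  simp only [pvBefore, Bool.or_eq_true, Bool.and_eq_true, Bool.not_eq_eq_eq_not, Bool.not_true,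
    decide_eq_true_iff, decide_eq_false_iff_not] at *
  rcases h1 with h1 | ⟨h1a, h1b⟩ <;> rcases h2 with h2 | ⟨h2a, h2b⟩
  · exact Or.inl (lt_trans h1 h2)
  · exact Or.inl (lt_of_lt_of_le h1 (le_of_not_gt h2a))
  · exact Or.inl (lt_of_le_of_lt (le_of_not_gt h1a) h2)
  · exact Or.inr ⟨fun h => h2a (lt_of_lt_of_le h (le_of_not_gt h1a)), lt_trans h1b h2b⟩

theorem pvBefore_asym (a b : Int × String) (h1 : pvBefore a b = true)
    (h2 : pvBefore b a = true) : False := by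
  simp only [pvBefore, Bool.or_eq_true, Bool.and_eq_true, Bool.not_eq_eq_eq_not, Bool.not_true,
    decide_eq_true_iff, decide_eq_false_iff_not] at *
  rcases h1 with h1 | ⟨h1a, h1b⟩ <;> rcases h2 with h2 | ⟨h2a, h2b⟩
  · exact absurd h2 (lt_asymm h1)
  · exact h2a h1
  · exact h1a h2
  · exact absurd h2b (lt_asymm h1b)

-- A false-valued pvBefore from non-trueness
theorem pvBefore_false_of_true {a b : Int × String} (h : pvBefore a b = true) :
    pvBefore b a = false := by
  cases hb : pvBefore b a
  · rfl
  · exact (pvBefore_asym a b h hb).elim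

theorem pairwise_insertBy (x : Int × String) (ys : List (Int × String))
    (h : ys.Pairwise (fun a b => pvBefore b a = false)) :
    (PySem.List.insertBy pvBefore x ys).Pairwise (fun a b => pvBefore b a = false) := by
  induction ys with
  | nil => simp [PySem.List.insertBy]
  | cons y t ih =>
    rcases List.pairwise_cons.mp h with ⟨hy, ht⟩
    by_cases hxy : pvBefore x y = true
    · simp only [PySem.List.insertBy, hxy, if_true]
      refine List.pairwise_cons.mpr ⟨?_, h⟩
      intro z hz
      rcases List.mem_cons.mp hz with rfl | hz
      · exact pvBefore_false_of_true hxy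
      · cases hzx : pvBefore z x
        · rfl
        · have hzy : pvBefore z y = true := pvBefore_trans z x y hzx hxy
          have := hy z hz
          simp [hzy] at this
    · have hxy' : pvBefore x y = false := by
        cases hxx : pvBefore x y
        · rfl
        · exact absurd hxx hxy
      simp only [PySem.List.insertBy, hxy', Bool.false_eq_true, if_false]
      refine List.pairwise_cons.mpr ⟨?_, ih ht⟩
      intro z hz
      rcases (PySem.List.mem_insertBy pvBefore x z t).mp hz with rfl | hz
      · exact hxy'
      · exact hy z hz

theorem pairwise_foldl_insertBy (xs : List (Int × String)) (acc : List (Int × String))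
    (hacc : acc.Pairwise (fun a b => pvBefore b a = false)) :
    (xs.foldl (fun acc x => PySem.List.insertBy pvBefore x acc) acc).Pairwise
      (fun a b => pvBefore b a = false) := by
  induction xs generalizing acc with
  | nil => exact hacc
  | cons x t ih => exact ih _ (pairwise_insertBy x acc hacc)

theorem sorted2_eq_foldl (xs : List (Int × String)) :
    PySem.List.sorted2 xs Prod.fst Prod.snd =
      xs.foldl (fun acc x => PySem.List.insertBy pvBefore x acc) [] := rfl

theorem mem_pvMergeT {z : Int × String} : ∀ (as bs : List Int), z ∈ pvMergeT as bs →
    (z.2 = "o" ∧ z.1 ∈ as) ∨ (z.2 = "t" ∧ z.1 ∈ bs)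
  | [], bs => by
    intro h
    simp only [pvMergeT, List.mem_map] at h
    rcases h with ⟨b, hb, rfl⟩
    exact Or.inr ⟨rfl, hb⟩
  | a :: at_, [] => by
    intro h
    simp only [pvMergeT, List.mem_cons] at h
    rcases h with rfl | h
    · exact Or.inl ⟨rfl, List.mem_cons_self⟩
    · rcases mem_pvMergeT at_ [] h with ⟨h1, h2⟩ | ⟨h1, h2⟩
      · exact Or.inl ⟨h1, List.mem_cons_of_mem _ h2⟩
      · simp at h2
  | a :: at_, b :: bt => by
    intro h
    simp only [pvMergeT] at h
    by_cases hab : a ≤ b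
    · simp only [hab, if_true, List.mem_cons] at h
      rcases h with rfl | h
      · exact Or.inl ⟨rfl, List.mem_cons_self⟩
      · rcases mem_pvMergeT at_ (b :: bt) h with ⟨h1, h2⟩ | ⟨h1, h2⟩
        · exact Or.inl ⟨h1, List.mem_cons_of_mem _ h2⟩
        · exact Or.inr ⟨h1, h2⟩
    · simp only [hab, if_false, List.mem_cons] at h
      rcases h with rfl | h
      · exact Or.inr ⟨rfl, List.mem_cons_self⟩
      · rcases mem_pvMergeT (a :: at_) bt h with ⟨h1, h2⟩ | ⟨h1, h2⟩
        · exact Or.inl ⟨h1, h2⟩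
        · exact Or.inr ⟨h1, List.mem_cons_of_mem _ h2⟩

theorem perm_pvMergeT : ∀ (as bs : List Int),
    (pvMergeT as bs).Perm (as.map (fun a => (a, "o")) ++ bs.map (fun b => (b, "t")))
  | [], bs => by simp [pvMergeT]
  | a :: at_, [] => by
    simp only [pvMergeT, List.map_nil, List.append_nil, List.map_cons]
    have := perm_pvMergeT at_ []
    simpa using this.cons (a, "o")
  | a :: at_, b :: bt => by
    simp only [pvMergeT]
    by_cases hab : a ≤ b
    · simp only [hab, if_true, List.map_cons, List.cons_append]
      exact (perm_pvMergeT at_ (b :: bt)).cons _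
    · simp only [hab, if_false]
      refine ((perm_pvMergeT (a :: at_) bt).cons _).trans ?_
      exact List.Perm.symm (List.perm_middle)

theorem pairwise_pvMergeT : ∀ (as bs : List Int), as.Pairwise (· ≤ ·) → bs.Pairwise (· ≤ ·) →
    (pvMergeT as bs).Pairwise (fun a b => pvBefore b a = false)
  | [], bs => by
    intro _ hbs
    simp only [pvMergeT]
    refine List.Pairwise.map _ ?_ hbs
    intro x y hxy
    simp [pvBefore, not_lt.mpr hxy, lt_irrefl]
  | a :: at_, [] => by
    intro has _
    rcases List.pairwise_cons.mp has with ⟨ha, hat⟩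
    simp only [pvMergeT]
    refine List.pairwise_cons.mpr ⟨?_, pairwise_pvMergeT at_ [] hat List.Pairwise.nil⟩
    intro z hz
    rcases mem_pvMergeT at_ [] hz with ⟨h1, h2⟩ | ⟨h1, h2⟩
    · have : a ≤ z.1 := ha _ h2
      simp [pvBefore, not_lt.mpr this, h1, lt_irrefl]
    · simp at h2
  | a :: at_, b :: bt => by
    intro has hbs
    rcases List.pairwise_cons.mp has with ⟨ha, hat⟩
    rcases List.pairwise_cons.mp hbs with ⟨hb, hbt⟩
    simp only [pvMergeT]
    by_cases hab : a ≤ b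
    · simp only [hab, if_true]
      refine List.pairwise_cons.mpr ⟨?_, pairwise_pvMergeT at_ (b :: bt) hat hbs⟩
      intro z hz
      rcases mem_pvMergeT at_ (b :: bt) hz with ⟨h1, h2⟩ | ⟨h1, h2⟩
      · have : a ≤ z.1 := ha _ h2
        simp [pvBefore, not_lt.mpr this, h1, lt_irrefl]
      · have hbz : b ≤ z.1 := by
          rcases List.mem_cons.mp h2 with h2 | h2
          · exact le_of_eq h2.symm
          · exact hb _ h2
        have : a ≤ z.1 := le_trans hab hbz
        simp [pvBefore, not_lt.mpr this, h1, pvStr_not_to]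
        intro _
        decide
    · simp only [hab, if_false]
      have hba : b < a := lt_of_not_ge hab
      refine List.pairwise_cons.mpr ⟨?_, pairwise_pvMergeT (a :: at_) bt has hbt⟩
      intro z hz
      rcases mem_pvMergeT (a :: at_) bt hz with ⟨h1, h2⟩ | ⟨h1, h2⟩
      · have haz : a ≤ z.1 := by
          rcases List.mem_cons.mp h2 with h2 | h2
          · exact le_of_eq h2.symm
          · exact ha _ h2
        have hbz : b < z.1 := lt_of_lt_of_le hba haz
        simp [pvBefore, not_lt.mpr (le_of_lt hbz), h1, hbz]
      · have : b ≤ z.1 := hb _ h2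
        simp [pvBefore, not_lt.mpr this, h1, lt_irrefl]

-- zip with a replicated tag is just a map
theorem zip_replicate_tag (xs : List Int) (c : String) :
    List.zip xs (List.replicate xs.length c) = xs.map (fun v => (v, c)) := by
  induction xs with
  | nil => rfl
  | cons x t ih => simpa [List.replicate_succ] using ih

-- the sorted tagged concatenation IS the tagged merge of the two sorted lists
theorem sorted2_eq_pvMergeT (our_acc theirs_acc : List Int) :
    PySem.List.sorted2
      (our_acc.map (fun v => (v, "o")) ++ theirs_acc.map (fun v => (v, "t")))
      Prod.fst Prod.snd =
    pvMergeT (PySem.List.sorted our_acc (fun x => x) false)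
      (PySem.List.sorted theirs_acc (fun x => x) false) := by
  set lo := PySem.List.sorted our_acc (fun x => x) false with hlo
  set lt := PySem.List.sorted theirs_acc (fun x => x) false with hlt
  set tg := our_acc.map (fun v => (v, "o")) ++ theirs_acc.map (fun v => (v, "t")) with htg
  have hperm1 : (PySem.List.sorted2 tg Prod.fst Prod.snd).Perm tg :=
    PySem.List.sorted2_perm tg Prod.fst Prod.snd false
  have hperm2 : (pvMergeT lo lt).Perm tg := by
    refine (perm_pvMergeT lo lt).trans ?_
    exact List.Perm.append ((PySem.List.sorted_perm our_acc (fun x => x) false).map _)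
      ((PySem.List.sorted_perm theirs_acc (fun x => x) false).map _)
  have hpw1 : (PySem.List.sorted2 tg Prod.fst Prod.snd).Pairwise (fun a b => pvBefore b a = false) := by
    rw [sorted2_eq_foldl]
    exact pairwise_foldl_insertBy tg [] List.Pairwise.nil
  have hpw2 : (pvMergeT lo lt).Pairwise (fun a b => pvBefore b a = false) :=
    pairwise_pvMergeT lo lt
      (by simpa using PySem.List.sorted_pairwise our_acc (fun x => x))
      (by simpa using PySem.List.sorted_pairwise theirs_acc (fun x => x))
  -- every tag in tg is "o" or "t"
  have htag : ∀ z : Int × String, z ∈ tg → z.2 = "o" ∨ z.2 = "t" := by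
    intro z hz
    rcases List.mem_append.mp hz with hz | hz <;>
      rcases List.mem_map.mp hz with ⟨v, _, rfl⟩
    · exact Or.inl rfl
    · exact Or.inr rfl
  refine List.eq_of_perm_of_sorted ?_ hpw1 hpw2 (hperm1.trans hperm2.symm)
  intro a b ha hb h1 h2
  have ha' : a.2 = "o" ∨ a.2 = "t" := htag a (hperm1.mem_iff.mp ha)
  have hb' : b.2 = "o" ∨ b.2 = "t" := htag b (hperm2.mem_iff.mp hb)
  simp only [pvBefore, Bool.or_eq_false_iff, Bool.and_eq_false_iff, Bool.not_eq_eq_eq_not,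
    Bool.not_false, decide_eq_false_iff_not, decide_eq_true_iff] at h1 h2
  rcases h1 with ⟨h1a, h1b⟩
  rcases h2 with ⟨h2a, h2b⟩
  have hfst : a.1 = b.1 := le_antisymm (le_of_not_gt h1a) (le_of_not_gt h2a)
  have hsnd : a.2 = b.2 := by
    rcases h1b with h | h
    · exact absurd hfst.symm (ne_of_gt h)
    · rcases h2b with h' | h'
      · exact absurd hfst (ne_of_gt h')
      · rcases ha' with ha2 | ha2 <;> rcases hb' with hb2 | hb2
        · rw [ha2, hb2]
        · exfalso; rw [ha2, hb2] at h'; exact h' pvStr_ot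
        · exfalso; rw [hb2, ha2] at h; exact h pvStr_ot
        · rw [ha2, hb2]
  exact Prod.ext hfst hsnd

-- B's two-pointer loop is the rank walk over the tagged merge
theorem alt_loop_eq_sumRanks : ∀ (as bs : List Int) (rank so st : Int),
    rank_sum_alt_loop as bs rank so st = pvSumRanks (pvMergeT as bs) rank so st
  | [], [], rank, so, st => by simp [rank_sum_alt_loop, pvMergeT, pvSumRanks]
  | [], b :: bt, rank, so, st => by
    simp only [rank_sum_alt_loop, pvMergeT, List.map_cons, pvSumRanks]
    rw [alt_loop_eq_sumRanks [] bt]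
    simp [pvMergeT]
  | a :: at_, [], rank, so, st => by
    simp only [rank_sum_alt_loop, pvMergeT, pvSumRanks]
    rw [alt_loop_eq_sumRanks at_ []]
    simp
  | a :: at_, b :: bt, rank, so, st => by
    simp only [rank_sum_alt_loop, pvMergeT]
    by_cases hab : a ≤ b
    · simp only [hab, if_true, pvSumRanks]
      rw [alt_loop_eq_sumRanks at_ (b :: bt)]
      simp
    · simp only [hab, if_false, pvSumRanks]
      rw [alt_loop_eq_sumRanks (a :: at_) bt]
      simp [pvSumRanks]

-- A's enumerate-and-fold is the same rank walk
theorem foldl_enumerate_eq_sumRanks : ∀ (l : List (Int × String)) (k so st : Int),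
    (PySem.List.enumerate l k).foldl
      (fun acc el =>
        if el.2.2 == "o" then (acc.1 + el.1 + 1, acc.2) else (acc.1, acc.2 + el.1 + 1))
      (so, st) = pvSumRanks l (k + 1) so st
  | [], k, so, st => rfl
  | (v, t) :: rest, k, so, st => by
    simp only [PySem.List.enumerate, List.foldl_cons, pvSumRanks]
    by_cases ht : t = "o"
    · simp only [ht, if_pos rfl, beq_self_eq_true, if_true]
      rw [foldl_enumerate_eq_sumRanks rest (k + 1) (so + k + 1) st]
      ring_nf
    · have : (t == "o") = false := beq_false_of_ne ht
      simp only [this, Bool.false_eq_true, if_false, if_neg ht]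
      rw [foldl_enumerate_eq_sumRanks rest (k + 1) so (st + k + 1)]
      ring_nf

-- ===== VERDICT (by name: the statement is the Claim_ definition above) =====
theorem rank_sum_spec : Claim_equal_rank_sum := by
  intro our_acc theirs_acc _
  unfold Spec_rank_sum rank_sum rank_sum_alt
  simp only []
  have hz1 : List.zip our_acc (PySem.List.pyRepeat ["o"] (our_acc.length : Int)) =
      our_acc.map (fun v => (v, "o")) := by
    rw [PySem.List.pyRepeat_singleton]
    simpa using zip_replicate_tag our_acc "o"
  have hz2 : List.zip theirs_acc (PySem.List.pyRepeat ["t"] (theirs_acc.length : Int)) =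
      theirs_acc.map (fun v => (v, "t")) := by
    rw [PySem.List.pyRepeat_singleton]
    simpa using zip_replicate_tag theirs_acc "t"
  rw [hz1, hz2, sorted2_eq_pvMergeT, foldl_enumerate_eq_sumRanks, alt_loop_eq_sumRanks]
  norm_num
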